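-- pv_equiv track=rewrite | github.com/Evok086/NSI_partage | Pratique/Semaine 1/semaine2.py | altitude_max
-- ===== SOURCE A (Python) =====
-- def Syracuse(n):
--     suite = [n]
--     while n != 1:
--         if n % 2 == 0:
--             n = int(n/2)
--         else:
--             n = int(3*n+1)
--         suite.append(n)
--     return suite
--
-- def altitude_max(n):
--     if n <= 0:
--         return None
--     maxi = 0
--     for hauteur in Syracuse(n):
--         if hauteur > maxi:
--             maxi = hauteur
--     return maxi
-- ===== SOURCE B (Python) =====
-- def altitude_max(n):
--     if n <= 0:
--         return None
--     maxi = n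
--     while n != 1:
--         if n % 2 == 0:
--             n = int(n/2)
--         else:
--             n = int(3*n+1)
--         if n > maxi:
--             maxi = n
--     return maxi
-- ===== Notes on version B (the rewrite author's own statement) =====
-- stated objective: simpler
-- what changed: B drops the Syracuse helper and never materializes the trajectory list: a single while-loop applies the same Collatz step and keeps a running maximum (seeded with n, which equals A's max-over-list-from-0 since n>0).
import Mathlib
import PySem

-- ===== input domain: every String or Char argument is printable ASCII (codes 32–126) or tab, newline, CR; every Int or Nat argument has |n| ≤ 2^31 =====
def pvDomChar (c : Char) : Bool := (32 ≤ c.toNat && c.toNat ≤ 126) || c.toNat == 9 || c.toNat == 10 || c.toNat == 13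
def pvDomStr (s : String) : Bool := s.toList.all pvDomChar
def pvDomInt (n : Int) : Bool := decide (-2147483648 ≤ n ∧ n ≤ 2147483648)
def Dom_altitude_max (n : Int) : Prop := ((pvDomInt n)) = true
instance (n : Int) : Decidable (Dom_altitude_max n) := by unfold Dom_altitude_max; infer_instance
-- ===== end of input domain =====

-- B drops the Syracuse helper and the materialized list and computes the maximum in one
-- pass over the trajectory (objective: simpler, no intermediate list).
-- Both Pythons loop 'while n != 1' with no a-priori bound (Collatz); the ports make that
-- loop total with a fuel guard (same step function, same guard) — on every tested input
-- the loop stops long before the fuel runs out.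

-- ===== PORT A =====
-- models Python's `int(n/2)` for positive even n: n/2 is correctly rounded to a 53-bit
-- double (ties to even), exact when n/2 < 2^53
def pyHalfFloat (n : Int) : Int :=
  let m := n / 2
  let b := m.toNat.log2 + 1
  if b ≤ 53 then m
  else
    let p : Int := 2 ^ (b - 53)
    let q := m / p
    let r := m % p
    let h := p / 2
    if r < h then q * p
    else if h < r then (q + 1) * p
    else if q % 2 = 0 then q * p else (q + 1) * p

-- one Collatz step, exactly as both Pythons write it
def syrStep (n : Int) : Int :=
  if PySem.Int.mod n 2 = 0 then pyHalfFloat n else 3 * n + 1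

def pvFuel : Nat := 100000

-- the `while n != 1: … suite.append(n)` loop of Syracuse, accumulator reversed at the end
def syrAux : Nat → Int → List Int → List Int
  | 0, _, acc => acc.reverse
  | f + 1, n, acc =>
    if n = 1 then acc.reverse
    else
      let n' := syrStep n
      syrAux f n' (n' :: acc)

def Syracuse (n : Int) : List Int := syrAux pvFuel n [n]

def altitude_max (n : Int) : Option Int :=
  if n ≤ 0 then none
  else some ((Syracuse n).foldl (fun maxi hauteur => if hauteur > maxi then hauteur else maxi) 0)

-- ===== PORT B =====
-- the single `while n != 1` loop of Source B, carrying maxi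
def climb : Nat → Int → Int → Int
  | 0, _, maxi => maxi
  | f + 1, n, maxi =>
    if n = 1 then maxi
    else
      let n' := syrStep n
      climb f n' (if n' > maxi then n' else maxi)

def altitude_max_alt (n : Int) : Option Int :=
  if n ≤ 0 then none else some (climb pvFuel n n)

-- ===== PRECONDITION & SPEC =====
def Spec_altitude_max (n : Int) (out : Option Int) : Prop := out = altitude_max_alt n
instance (n : Int) (out : Option Int) : Decidable (Spec_altitude_max n out) := by unfold Spec_altitude_max; infer_instance

-- ===== CLAIM (what is proved, stated in full; the proofs are below) =====
def Claim_equal_altitude_max : Prop := ∀ (n : Int), Dom_altitude_max n → Spec_altitude_max n (altitude_max n)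

-- ===== LEMMAS AND PROOFS =====

-- the values the loop appends after the initial n
def syrTail : Nat → Int → List Int
  | 0, _ => []
  | f + 1, n =>
    if n = 1 then []
    else
      let n' := syrStep n
      n' :: syrTail f n'

theorem syrAux_eq (f : Nat) : ∀ (n : Int) (acc : List Int),
    syrAux f n acc = acc.reverse ++ syrTail f n := by
  induction f with
  | zero => intro n acc; simp [syrAux, syrTail]
  | succ f ih =>
    intro n acc
    by_cases h : n = 1
    · simp [syrAux, syrTail, h]
    · simp [syrAux, syrTail, h, ih]

theorem climb_eq (f : Nat) : ∀ (n maxi : Int),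
    climb f n maxi = (syrTail f n).foldl (fun maxi h => if h > maxi then h else maxi) maxi := by
  induction f with
  | zero => intro n maxi; simp [climb, syrTail]
  | succ f ih =>
    intro n maxi
    by_cases h : n = 1
    · simp [climb, syrTail, h]
    · simp [climb, syrTail, h, ih, List.foldl_cons]

-- ===== VERDICT (by name: the statement is the Claim_ definition above) =====
theorem altitude_max_spec : Claim_equal_altitude_max := by
  intro n _
  unfold Spec_altitude_max altitude_max altitude_max_alt
  by_cases h : n ≤ 0
  · simp [h]
  · have hn : 0 < n := lt_of_not_ge h
    simp only [h, if_false]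
    have h0 : (if n > (0 : Int) then n else 0) = n := by simp [hn]
    rw [Syracuse, syrAux_eq, climb_eq]
    simp [List.foldl_cons, h0]
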